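-- pv_equiv track=rewrite | github.com/BlueJacket98/CodeSignal | maxRevenueFromStocks.py | maxRevenueFromStocks
-- ===== SOURCE A (Python) =====
-- def maxRevenueFromStocks(prices, algo, k):
--     for i in range(len(algo)):
--         if algo[i] == 0:
--             algo[i] = -1
--
--     originalRev = windowSum(prices, algo)
--     curWindowSum = windowSum(prices[:k], algo[:k])
--     curWindowSellSum = sum(prices[:k])
--     maxDiff = curWindowSellSum - curWindowSum
--     for i in range(k, len(prices)):
--         curWindowSum = curWindowSum - prices[i-k] * algo[i-k] + prices[i] * algo[i]
--         curWindowSellSum = curWindowSellSum - prices[i-k] + prices[i]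
--         maxDiff = max(maxDiff, curWindowSellSum - curWindowSum)
--
--     return originalRev + maxDiff
--
-- def windowSum(prices, algo):
--     rev = 0
--     for i in range(len(prices)):
--         rev += prices[i] * algo[i]
--     return rev
-- ===== SOURCE B (Python) =====
-- def maxRevenueFromStocks(prices, algo, k):
--     # same in-place normalisation as the original: 0 means "sell" encoded as -1
--     for i in range(len(algo)):
--         if algo[i] == 0:
--             algo[i] = -1
--
--     originalRev = sum(p * a for p, a in zip(prices, algo))
--     gains = [p - p * a for p, a in zip(prices, algo)]
--     prefix = [0]
--     for g in gains:
--         prefix.append(prefix[-1] + g)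
--
--     n = len(prices)
--     w = min(k, n)
--     best = max(prefix[i + w] - prefix[i] for i in range(n - w + 1))
--     return originalRev + best
-- ===== Notes on version B (the rewrite author's own statement) =====
-- stated objective: simpler
-- what changed: Replaces A's three-accumulator sliding-window update loop with a prefix-sum array of per-day flip gains: the answer is the base revenue plus the maximum prefix[i+w]-prefix[i] over all windows (w = min(k, n)), with no incremental window bookkeeping.
import Mathlib
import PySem

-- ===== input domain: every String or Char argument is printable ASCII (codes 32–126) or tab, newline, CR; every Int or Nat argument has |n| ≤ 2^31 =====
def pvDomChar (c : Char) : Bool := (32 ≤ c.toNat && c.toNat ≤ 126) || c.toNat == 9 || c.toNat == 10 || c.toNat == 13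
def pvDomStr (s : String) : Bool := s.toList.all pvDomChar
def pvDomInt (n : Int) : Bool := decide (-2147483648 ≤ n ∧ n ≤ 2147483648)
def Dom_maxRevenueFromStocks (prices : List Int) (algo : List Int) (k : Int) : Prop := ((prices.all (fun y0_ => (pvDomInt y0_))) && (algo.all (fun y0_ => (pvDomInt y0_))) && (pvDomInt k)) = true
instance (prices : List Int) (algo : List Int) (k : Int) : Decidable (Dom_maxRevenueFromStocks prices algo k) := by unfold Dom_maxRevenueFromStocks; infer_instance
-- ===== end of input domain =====

-- B replaces A's incremental sliding-window bookkeeping by a prefix-sum array of per-day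
-- flip gains (simpler decomposition, same O(n) cost). Both A and B mutate `algo` in place
-- (0 -> -1) identically in Python; the theorems here are about the return value.


-- ===== PORT A =====
-- the in-place loop `for i in range(len(algo)): if algo[i] == 0: algo[i] = -1`
-- (identical source line in A and in B, hence a shared helper)
def pvFlipZeros (algo : List Int) : List Int :=
  (PySem.List.pyRange 0 (algo.length : Int) 1).foldl
    (fun a i => if PySem.List.pyGetD a i 0 = 0 then PySem.List.pySetD a i (-1) else a) algo

-- helper windowSum(prices, algo)
def pvWindowSum (prices algo : List Int) : Int :=
  (PySem.List.pyRange 0 (prices.length : Int) 1).foldl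
    (fun rev i => rev + PySem.List.pyGetD prices i 0 * PySem.List.pyGetD algo i 0) 0

def maxRevenueFromStocks (prices : List Int) (algo : List Int) (k : Int) : Int :=
  let algo2 := pvFlipZeros algo
  let originalRev := pvWindowSum prices algo2
  let pk := PySem.List.slice prices none (some k)
  let ak := PySem.List.slice algo2 none (some k)
  let cw0 := pvWindowSum pk ak
  let cs0 := pk.sum
  let st := (PySem.List.pyRange k (prices.length : Int) 1).foldl
    (fun (s : Int × Int × Int) i =>
      let cw := s.1 - PySem.List.pyGetD prices (i - k) 0 * PySem.List.pyGetD algo2 (i - k) 0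
                 + PySem.List.pyGetD prices i 0 * PySem.List.pyGetD algo2 i 0
      let cs := s.2.1 - PySem.List.pyGetD prices (i - k) 0 + PySem.List.pyGetD prices i 0
      (cw, cs, max s.2.2 (cs - cw)))
    (cw0, cs0, cs0 - cw0)
  originalRev + st.2.2

-- ===== PORT B =====
def maxRevenueFromStocks_alt (prices : List Int) (algo : List Int) (k : Int) : Int :=
  let algo2 := pvFlipZeros algo
  let z := prices.zip algo2
  let originalRev := (z.map (fun pa => pa.1 * pa.2)).sum
  let gains := z.map (fun pa => pa.1 - pa.1 * pa.2)
  let pfx := gains.foldl (fun ps g => ps ++ [PySem.List.pyGetD ps (-1) 0 + g]) [0]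
  let n : Int := (prices.length : Int)
  let w := min k n
  let best := (PySem.List.max?
      ((PySem.List.pyRange 0 (n - w + 1) 1).map
        (fun i => PySem.List.pyGetD pfx (i + w) 0 - PySem.List.pyGetD pfx i 0)) id).getD 0
  originalRev + best

-- ===== PRECONDITION & SPEC =====
-- A raises IndexError exactly when k < 0 (the update loop reads prices[i-k] past the end,
-- or a negative index past the front) or when algo is shorter than prices (windowSum reads
-- algo[i] for every i < len(prices)); Pre_ admits precisely the inputs on which A returns.
def Pre_maxRevenueFromStocks (prices : List Int) (algo : List Int) (k : Int) : Prop :=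
  0 ≤ k ∧ prices.length ≤ algo.length
instance (prices : List Int) (algo : List Int) (k : Int) : Decidable (Pre_maxRevenueFromStocks prices algo k) := by unfold Pre_maxRevenueFromStocks; infer_instance

def pvWitness_maxRevenueFromStocks : List Int × List Int × Int := ([3, 1, 4], [1, 0, 1], 2)

def Spec_maxRevenueFromStocks (prices : List Int) (algo : List Int) (k : Int) (out : Int) : Prop := out = maxRevenueFromStocks_alt prices algo k
instance (prices : List Int) (algo : List Int) (k : Int) (out : Int) : Decidable (Spec_maxRevenueFromStocks prices algo k out) := by unfold Spec_maxRevenueFromStocks; infer_instance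

-- ===== CLAIM (what is proved, stated in full; the proofs are below) =====
def Claim_equal_maxRevenueFromStocks : Prop := ∀ (prices : List Int) (algo : List Int) (k : Int), Dom_maxRevenueFromStocks prices algo k → Pre_maxRevenueFromStocks prices algo k → Spec_maxRevenueFromStocks prices algo k (maxRevenueFromStocks prices algo k)

-- ===== LEMMAS AND PROOFS =====

-- the "flip 0 to -1" elementwise function
def pvF (x : Int) : Int := if x = 0 then -1 else x

-- prefix sums of prices[j]*algo[j] and of prices[j] (read with getD, hence total)
def pvDotTo (p a : List Int) (t : Nat) : Int :=
  ((List.range t).map (fun j => p.getD j 0 * a.getD j 0)).sum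
def pvPTo (p : List Int) (t : Nat) : Int :=
  ((List.range t).map (fun j => p.getD j 0)).sum
-- gain of flipping the window starting at t, through prefix sums
def pvG (p a : List Int) (k' t : Nat) : Int :=
  (pvPTo p (t + k') - pvDotTo p a (t + k')) - (pvPTo p t - pvDotTo p a t)
-- running maximum of window gains: the quantity A's third accumulator tracks
def pvMaxD (p a : List Int) (k' m : Nat) : Int :=
  (List.range m).foldl (fun acc j => max acc (pvG p a k' (j + 1))) (pvG p a k' 0)
-- the partial sums B's prefix list appends after the leading 0
def pvPartials (x : Int) : List Int → List Int
  | [] => []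
  | g :: gs => (x + g) :: pvPartials (x + g) gs

theorem pv_flip_aux (algo : List Int) (m : Nat) (hm : m ≤ algo.length) :
    (List.range m).foldl
      (fun a (j : Nat) => if a.getD j 0 = 0 then a.set j (-1) else a) algo
    = (algo.take m).map pvF ++ algo.drop m := by
  induction m with
  | zero => simp
  | succ m ih =>
    have hm' : m ≤ algo.length := by omega
    rw [List.range_succ, List.foldl_append, ih hm']
    have hlt : m < algo.length := by omega
    have hlen : ((algo.take m).map pvF).length = m := by
      simp [List.length_take, Nat.min_eq_left hm']
    have hdrop : algo.drop m = algo[m] :: algo.drop (m+1) := List.drop_eq_getElem_cons hlt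
    have hget : ((algo.take m).map pvF ++ algo.drop m).getD m 0 = algo[m] := by
      rw [List.getD_eq_getElem?_getD, List.getElem?_append_right hlen.le, hlen,
        Nat.sub_self, hdrop]
      rfl
    have hset : ∀ v : Int, ((algo.take m).map pvF ++ algo.drop m).set m v
        = (algo.take m).map pvF ++ v :: algo.drop (m+1) := by
      intro v
      rw [List.set_append_right _ _ hlen.le, hlen, Nat.sub_self, hdrop,
        List.set_cons_zero]
    have htake : (algo.take (m+1)).map pvF = (algo.take m).map pvF ++ [pvF algo[m]] := by
      rw [List.take_add_one, List.map_append]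
      congr 1
      simp [hlt]
    simp only [List.foldl_cons, List.foldl_nil, hget]
    by_cases h0 : algo[m] = 0
    · rw [if_pos h0, hset, htake]
      simp [pvF, h0]
    · rw [if_neg h0, htake, hdrop]
      simp [pvF, h0]

theorem pv_flip_eq (algo : List Int) : pvFlipZeros algo = algo.map pvF := by
  unfold pvFlipZeros
  rw [PySem.List.pyRange_zero_nat, List.foldl_map]
  have := pv_flip_aux algo algo.length (le_refl _)
  simpa using this

theorem pv_windowSum_eq (p a : List Int) :
    pvWindowSum p a = ((List.range p.length).map (fun j => p.getD j 0 * a.getD j 0)).sum := by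
  unfold pvWindowSum
  rw [PySem.List.pyRange_zero_nat, List.foldl_map]
  simp only [PySem.List.pyGetD_natCast]
  rw [PySem.List.foldl_add]
  simp

theorem pvDotTo_succ (p a : List Int) (t : Nat) :
    pvDotTo p a (t + 1) = pvDotTo p a t + p.getD t 0 * a.getD t 0 := by
  simp [pvDotTo, List.range_succ]
theorem pvPTo_succ (p : List Int) (t : Nat) :
    pvPTo p (t + 1) = pvPTo p t + p.getD t 0 := by
  simp [pvPTo, List.range_succ]
theorem pvMaxD_succ (p a : List Int) (k' m : Nat) :
    pvMaxD p a k' (m + 1) = max (pvMaxD p a k' m) (pvG p a k' (m + 1)) := by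
  simp [pvMaxD, List.range_succ]

theorem pv_getD_take (xs : List Int) (m j : Nat) (h : j < m) :
    (xs.take m).getD j 0 = xs.getD j 0 := by
  rw [List.getD_eq_getElem?_getD, List.getD_eq_getElem?_getD, List.getElem?_take_of_lt h]

theorem pv_take_eq_map_range (xs : List Int) (m : Nat) (h : m ≤ xs.length) :
    xs.take m = (List.range m).map (fun j => xs.getD j 0) := by
  apply List.ext_getElem
  · simp [List.length_take, Nat.min_eq_left h]
  · intro i h1 h2
    simp only [List.getElem_take, List.getElem_map, List.getElem_range]
    rw [List.getD_eq_getElem?_getD]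
    have : i < xs.length := by simp at h2; omega
    simp [List.getElem?_eq_getElem this]

theorem pv_map_zip_eq (p a : List Int) (f : Int × Int → Int) (h : p.length ≤ a.length) :
    (p.zip a).map f = (List.range p.length).map (fun j => f (p.getD j 0, a.getD j 0)) := by
  apply List.ext_getElem
  · simp [List.length_zip, Nat.min_eq_left h]
  · intro i h1 h2
    have hip : i < p.length := by simp [List.length_zip] at h1; omega
    have hia : i < a.length := by omega
    simp [List.getElem_zip, List.getD_eq_getElem?_getD,
      List.getElem?_eq_getElem hip, List.getElem?_eq_getElem hia]

theorem pv_sum_map_sub (l : List Nat) (f g : Nat → Int) :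
    (l.map (fun j => f j - g j)).sum = (l.map f).sum - (l.map g).sum := by
  induction l with
  | nil => simp
  | cons x l ih => simp [ih]; ring

theorem pv_prefix_foldl : ∀ (gs ps : List Int) (x : Int),
    gs.foldl (fun ps g => ps ++ [PySem.List.pyGetD ps (-1) 0 + g]) (ps ++ [x])
    = ps ++ x :: pvPartials x gs := by
  intro gs
  induction gs with
  | nil => intro ps x; simp [pvPartials]
  | cons g gs ih =>
    intro ps x
    simp only [List.foldl_cons, PySem.List.pyGetD_neg_one_append_singleton]
    have := ih (ps ++ [x]) (x + g)
    rw [this]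
    simp [pvPartials]

theorem pv_partials_getElem? : ∀ (gs : List Int) (x : Int) (j : Nat), j ≤ gs.length →
    (x :: pvPartials x gs)[j]? = some (x + (gs.take j).sum) := by
  intro gs
  induction gs with
  | nil =>
    intro x j h
    have : j = 0 := by simpa using h
    subst this; simp
  | cons g gs ih =>
    intro x j h
    cases j with
    | zero => simp
    | succ j =>
      simp only [pvPartials, List.getElem?_cons_succ]
      have hj : j ≤ gs.length := by simpa using h
      rw [show ((x+g) :: pvPartials (x+g) gs)[j]? = some ((x+g) + (gs.take j).sum) from
        ih (x + g) j hj]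
      simp
      ring

theorem pv_max?_cons (r : List Int) : ∀ (x : Int),
    PySem.List.max? (x :: r) id = some (r.foldl max x) := by
  induction r with
  | nil => intro x; rfl
  | cons y r ih =>
    intro x
    have h1 : PySem.List.max? (x :: y :: r) id = PySem.List.max? (max x y :: r) id := by
      show List.foldl _ _ (x :: y :: r) = List.foldl _ _ (max x y :: r)
      simp only [List.foldl_cons]
      congr 1
      show (if id x < id y then some y else some x) = some (max x y)
      by_cases h : x < y <;> simp [h, max_def] <;> omega
    rw [h1, ih (max x y), List.foldl_cons]

theorem pv_loopA (p a : List Int) (k' : Nat) : ∀ (m : Nat),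
    (PySem.List.pyRange (k' : Int) ((k' : Int) + (m : Int)) 1).foldl
      (fun (s : Int × Int × Int) i =>
        (s.1 - PySem.List.pyGetD p (i - (k' : Int)) 0 * PySem.List.pyGetD a (i - (k' : Int)) 0
           + PySem.List.pyGetD p i 0 * PySem.List.pyGetD a i 0,
         s.2.1 - PySem.List.pyGetD p (i - (k' : Int)) 0 + PySem.List.pyGetD p i 0,
         max s.2.2 ((s.2.1 - PySem.List.pyGetD p (i - (k' : Int)) 0 + PySem.List.pyGetD p i 0)
           - (s.1 - PySem.List.pyGetD p (i - (k' : Int)) 0 * PySem.List.pyGetD a (i - (k' : Int)) 0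
           + PySem.List.pyGetD p i 0 * PySem.List.pyGetD a i 0))))
      (pvDotTo p a k', pvPTo p k', pvPTo p k' - pvDotTo p a k')
    = (pvDotTo p a (m + k') - pvDotTo p a m, pvPTo p (m + k') - pvPTo p m, pvMaxD p a k' m) := by
  intro m
  induction m with
  | zero =>
    rw [PySem.List.pyRange_one_eq_nil (by omega)]
    simp [pvDotTo, pvPTo, pvMaxD, pvG]
  | succ m ih =>
    have hcast : ((k' : Int) + ((m : Nat) + 1 : Nat)) = ((k' : Int) + (m : Int)) + 1 := by
      push_cast; ring
    rw [hcast, PySem.List.pyRange_one_succ_right (by omega), List.foldl_append, ih]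
    simp only [List.foldl_cons, List.foldl_nil]
    have hidx2 : ((k' : Int) + (m : Int)) = ((m + k' : Nat) : Int) := by push_cast; ring
    have hidx3 : (((m + k' : Nat) : Int) - (k' : Int)) = (m : Int) := by push_cast; ring
    simp only [hidx2, hidx3, PySem.List.pyGetD_natCast]
    have hdot : pvDotTo p a (m + 1 + k') = pvDotTo p a (m + k') + p.getD (m + k') 0 * a.getD (m + k') 0 := by
      rw [show m + 1 + k' = (m + k') + 1 by omega, pvDotTo_succ]
    have hpt : pvPTo p (m + 1 + k') = pvPTo p (m + k') + p.getD (m + k') 0 := by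
      rw [show m + 1 + k' = (m + k') + 1 by omega, pvPTo_succ]
    simp only [Prod.mk.injEq]
    refine ⟨?_, ?_, ?_⟩
    · rw [hdot, pvDotTo_succ]; ring
    · rw [hpt, pvPTo_succ]; ring
    · rw [pvMaxD_succ]
      congr 1
      rw [pvG, hdot, hpt, pvDotTo_succ, pvPTo_succ]
      ring

theorem pv_main (prices algo : List Int) (k : Int) (hk : 0 ≤ k)
    (hlen : prices.length ≤ algo.length) :
    maxRevenueFromStocks prices algo k = maxRevenueFromStocks_alt prices algo k := by
  have hk' : k = ((k.toNat : Nat) : Int) := (Int.toNat_of_nonneg hk).symm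
  set k' : Nat := k.toNat with hkdef
  set n : Nat := prices.length with hndef
  set a2 : List Int := algo.map pvF with ha2
  have ha2len : n ≤ a2.length := by simpa [ha2] using hlen
  simp only [maxRevenueFromStocks, maxRevenueFromStocks_alt, pv_flip_eq]
  rw [hk']
  -- shared facts
  have h_orig : pvWindowSum prices a2 = pvDotTo prices a2 n := by
    rw [pv_windowSum_eq]; rfl
  have h_origB : ((prices.zip a2).map (fun pa => pa.1 * pa.2)).sum = pvDotTo prices a2 n := by
    rw [pv_map_zip_eq _ _ _ ha2len]; rfl
  have h_gains : (prices.zip a2).map (fun pa => pa.1 - pa.1 * pa.2)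
      = (List.range n).map (fun j => prices.getD j 0 - prices.getD j 0 * a2.getD j 0) :=
    pv_map_zip_eq _ _ _ ha2len
  set gains : List Int := (prices.zip a2).map (fun pa => pa.1 - pa.1 * pa.2) with hgdef
  have h_glen : gains.length = n := by
    rw [h_gains]; simp
  have h_pfx : gains.foldl (fun ps g => ps ++ [PySem.List.pyGetD ps (-1) 0 + g]) [0]
      = 0 :: pvPartials 0 gains := by
    simpa using pv_prefix_foldl gains [] 0
  have h_pfxget : ∀ j : Nat, j ≤ n →
      PySem.List.pyGetD (0 :: pvPartials 0 gains) ((j : Nat) : Int) 0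
      = pvPTo prices j - pvDotTo prices a2 j := by
    intro j hj
    rw [PySem.List.pyGetD_natCast, List.getD_eq_getElem?_getD,
      pv_partials_getElem? gains 0 j (by omega)]
    simp only [Option.getD_some, zero_add]
    rw [h_gains, ← List.map_take, List.take_range, Nat.min_eq_left hj,
      pv_sum_map_sub]
    rfl
  rw [h_orig, h_origB, h_pfx, ← ha2, ← hndef]
  rcases Nat.lt_or_ge n k' with hcase2 | hcase
  · -- n < k' : the window is all of prices, the update loop is empty
    rw [PySem.List.slice_to_natCast, PySem.List.slice_to_natCast,
      List.take_of_length_le (le_of_eq_of_le hndef.symm (by omega))]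
    have hcw0 : pvWindowSum prices (a2.take k') = pvDotTo prices a2 n := by
      rw [pv_windowSum_eq]
      unfold pvDotTo
      rw [← hndef]
      congr 1
      apply List.map_congr_left
      intro j hj
      have hj' : j < n := List.mem_range.mp hj
      rw [pv_getD_take a2 k' j (by omega)]
    have hcs0 : prices.sum = pvPTo prices n := by
      have hmr := pv_take_eq_map_range prices n (le_of_eq hndef)
      have htn : prices.take n = prices := by rw [hndef]; exact List.take_length
      rw [htn] at hmr
      conv_lhs => rw [hmr]
      rfl
    have hnil : PySem.List.pyRange ((k' : Nat) : Int) ((n : Nat) : Int) 1 = [] := by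
      apply PySem.List.pyRange_one_eq_nil
      exact_mod_cast hcase2.le
    rw [hcw0, hcs0, hnil]
    simp only [List.foldl_nil]
    have hw : min ((k' : Nat) : Int) ((n : Nat) : Int) = ((n : Nat) : Int) := by
      have : (n : Int) ≤ (k' : Int) := by exact_mod_cast hcase2.le
      omega
    rw [hw]
    have hcnt : ((n : Nat) : Int) - ((n : Nat) : Int) + 1 = ((1 : Nat) : Int) := by
      norm_num
    rw [hcnt, PySem.List.pyRange_zero_nat]
    simp only [List.range_one, List.map_cons, List.map_nil]
    rw [show ((((0 : Nat)) : Int) + ((n : Nat) : Int)) = ((n : Nat) : Int) by push_cast; ring,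
      h_pfxget n (le_refl _), h_pfxget 0 (by omega), pv_max?_cons, Option.getD_some,
      List.foldl_nil]
    simp only [pvPTo, pvDotTo, List.range_zero, List.map_nil, List.sum_nil]
    ring

  · -- k' ≤ n : the window is prices[:k'], the update loop runs n - k' times
    rw [PySem.List.slice_to_natCast, PySem.List.slice_to_natCast]
    have hcw0 : pvWindowSum (prices.take k') (a2.take k') = pvDotTo prices a2 k' := by
      rw [pv_windowSum_eq]
      have hlen' : (prices.take k').length = k' := by
        simp only [List.length_take, hndef.symm]
        omega
      rw [hlen']
      unfold pvDotTo
      congr 1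
      apply List.map_congr_left
      intro j hj
      have hj' : j < k' := List.mem_range.mp hj
      rw [pv_getD_take prices k' j hj', pv_getD_take a2 k' j hj']
    have hcs0 : (prices.take k').sum = pvPTo prices k' := by
      rw [pv_take_eq_map_range prices k' (by omega)]
      rfl
    have hrange : ((n : Nat) : Int) = ((k' : Nat) : Int) + ((n - k' : Nat) : Int) := by
      push_cast; omega
    rw [hcw0, hcs0, hrange, pv_loopA prices a2 k' (n - k')]
    have hw : min ((k' : Nat) : Int) ((k' : Int) + ((n - k' : Nat) : Int)) = (k' : Int) := by
      omega
    rw [hw]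
    have hcnt : (k' : Int) + ((n - k' : Nat) : Int) - (k' : Int) + 1 = ((n - k' + 1 : Nat) : Int) := by
      push_cast; omega
    rw [hcnt, PySem.List.pyRange_zero_nat, List.map_map]
    have hmap2 : (List.range (n - k' + 1)).map
        ((fun i => PySem.List.pyGetD (0 :: pvPartials 0 gains) (i + (k' : Int)) 0
          - PySem.List.pyGetD (0 :: pvPartials 0 gains) i 0) ∘ (fun j : Nat => (j : Int)))
        = (List.range (n - k' + 1)).map (fun j => pvG prices a2 k' j) := by
      apply List.map_congr_left
      intro j hj
      have hj' : j < n - k' + 1 := List.mem_range.mp hj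
      simp only [Function.comp]
      rw [show ((j : Int) + (k' : Int)) = (((j + k' : Nat)) : Int) by push_cast; ring,
        h_pfxget (j + k') (by omega), h_pfxget j (by omega)]
      rfl
    rw [hmap2, List.range_succ_eq_map, List.map_cons, List.map_map, pv_max?_cons,
      Option.getD_some, List.foldl_map]
    have hfun : (fun (acc : Int) (j : Nat) => max acc ((pvG prices a2 k' ∘ Nat.succ) j))
        = (fun (acc : Int) (j : Nat) => max acc (pvG prices a2 k' (j + 1))) := by
      funext acc j
      simp [Nat.succ_eq_add_one]
    rw [hfun]
    rfl
-- ===== VERDICT (by name: the statement is the Claim_ definition above) =====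
theorem maxRevenueFromStocks_spec : Claim_equal_maxRevenueFromStocks := by
  intro prices algo k _ hpre
  unfold Spec_maxRevenueFromStocks
  exact pv_main prices algo k hpre.1 hpre.2
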